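-- pv_equiv track=rewrite | github.com/AppDevIn/Competitive-programming | LeetCode-Problem/2061. Number of Spaces Cleaning Robot Cleaned/solution.py | numberOfCleanRooms
-- ===== SOURCE A (Python) =====
-- from typing import List
--
-- def numberOfCleanRooms(room: List[List[int]]) -> int:
--
--     directions = [(0,1), (1, 0), (0, -1), (-1, 0)]
--     cleaned = []
--     visited = []
--     row, col = 0, 0
--     directionIndex = 0
--     maxRow, maxCol = len(room), len(room[0])
--
--     while (row, col, directionIndex) not in visited:
--         if col in [-1, maxCol] or row in [-1, maxRow] or room[row][col] == 1:
--             visited.append((row, col, directionIndex))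
--             row -= directions[directionIndex][0]
--             col -= directions[directionIndex][1]
--             directionIndex = (directionIndex + 1) % 4
--             r, c = directions[directionIndex]
--             row += r
--             col += c
--         else:
--             if (row, col) not in cleaned:
--                 cleaned.append((row, col))
--             r, c = directions[directionIndex]
--             row += r
--             col += c
--
--     return len(cleaned)
-- ===== SOURCE B (Python) =====
-- from typing import List
--
-- def numberOfCleanRooms(room: List[List[int]]) -> int:
--     # Fixed-horizon iteration: the robot's state (row, col, dir) lives in a space of at
--     # most 4*m*n states, and one deterministic step is "advance if the cell ahead is free,
--     # else turn right in place".  After 4*m*n steps the trajectory has necessarily entered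
--     # its cycle, so every cell the robot ever cleans has been recorded: no visited-state
--     # bookkeeping or cycle detection is needed at all.
--     m, n = len(room), len(room[0])
--
--     def step(state):
--         r, c, d = state
--         dr, dc = ((0, 1), (1, 0), (0, -1), (-1, 0))[d]
--         nr, nc = r + dr, c + dc
--         if 0 <= nr < m and 0 <= nc < n and room[nr][nc] != 1:
--             return (nr, nc, d)
--         return (r, c, (d + 1) % 4)
--
--     state = (0, 0, 0)
--     cleaned = {(0, 0)}
--     for _ in range(4 * m * n):
--         state = step(state)
--         cleaned.add(state[:2])
--     return len(cleaned)
-- ===== Notes on version B (the rewrite author's own statement) =====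
-- stated objective: alternative
-- what changed: B drops A's cycle-detection bookkeeping (the visited list of blocked states and the move-then-back-up arithmetic) entirely: it iterates a pure peek-ahead step function (advance if the cell ahead is free, else rotate in place) for a fixed pigeonhole horizon of 4*m*n steps, collecting positions in a set, since the deterministic trajectory over at most 4*m*n states must have entered its cycle by then.
-- outside the precondition, e.g. on numberOfCleanRooms([[1, 0]]): A returns 0, B returns 2; on numberOfCleanRooms([[0, 1], [1]]): A returns 1, B returns 1
import Mathlib
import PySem

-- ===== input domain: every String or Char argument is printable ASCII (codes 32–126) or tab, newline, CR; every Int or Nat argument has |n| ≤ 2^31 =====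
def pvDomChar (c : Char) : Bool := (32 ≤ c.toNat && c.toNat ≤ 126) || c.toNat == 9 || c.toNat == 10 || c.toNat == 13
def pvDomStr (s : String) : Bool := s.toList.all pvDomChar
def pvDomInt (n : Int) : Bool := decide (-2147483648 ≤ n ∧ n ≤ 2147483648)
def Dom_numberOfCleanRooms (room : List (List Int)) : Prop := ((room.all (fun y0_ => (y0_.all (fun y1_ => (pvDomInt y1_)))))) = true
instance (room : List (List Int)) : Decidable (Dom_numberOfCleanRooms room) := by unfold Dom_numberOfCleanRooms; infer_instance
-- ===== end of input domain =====

-- B replaces A's cycle-detecting simulation (visited list of blocked states, move-then-back-up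
-- arithmetic) by iterating a pure peek-ahead step function for a fixed pigeonhole horizon of
-- 4*m*n steps, with no cycle detection at all (alternative algorithm, similar cost).

-- room[r][c] under Python indexing
def pvCell (room : List (List Int)) (r c : Int) : Option Int :=
  (PySem.List.pyGet? room r).bind (fun row => PySem.List.pyGet? row c)

-- ===== PORT A =====
def pvDirs : List (Int × Int) := [(0,1),(1,0),(0,-1),(-1,0)]

-- directions[d]; d is always 0..3 in A's loop, so the lookup never misses (default never read)
def pvDirAt (d : Int) : Int × Int := (PySem.List.pyGet? pvDirs d).getD (0,0)

-- `col in [-1, maxCol] or row in [-1, maxRow] or room[row][col] == 1`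
def pvABlocked (room : List (List Int)) (maxRow maxCol row col : Int) : Bool :=
  col == -1 || col == maxCol || row == -1 || row == maxRow || pvCell room row col == some 1

-- fuel guard for A's while-loop (generous upper bound on its number of iterations; it only
-- makes the recursion total, no branch of the Python is altered)
def pvBase (room : List (List Int)) : Nat :=
  4 * (room.length + 2) * ((room.headD []).length + 2) * (room.length + (room.headD []).length + 2)

def pvALoop (room : List (List Int)) (maxRow maxCol : Int) :
    Nat → Int → Int → Int → List (Int × Int × Int) → List (Int × Int) → Int
  | 0, _, _, _, _, cleaned => (cleaned.length : Int)
  | fuel+1, row, col, d, visited, cleaned =>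
    if (row, col, d) ∈ visited then (cleaned.length : Int)
    else if pvABlocked room maxRow maxCol row col then
      let visited' := visited ++ [(row, col, d)]
      let p := pvDirAt d
      let row1 := row - p.1
      let col1 := col - p.2
      let d' := PySem.Int.mod (d + 1) 4
      let q := pvDirAt d'
      pvALoop room maxRow maxCol fuel (row1 + q.1) (col1 + q.2) d' visited' cleaned
    else
      let cleaned' := if (row, col) ∈ cleaned then cleaned else cleaned ++ [(row, col)]
      let p := pvDirAt d
      pvALoop room maxRow maxCol fuel (row + p.1) (col + p.2) d visited cleaned'

def numberOfCleanRooms (room : List (List Int)) : Int :=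
  -- room[0] raises on an empty room (excluded by Pre_); getD [] is the totality fallback
  let maxRow : Int := room.length
  let maxCol : Int := ((PySem.List.pyGet? room 0).getD []).length
  pvALoop room maxRow maxCol (pvBase room + 2) 0 0 0 [] []

-- ===== PORT B =====
-- `0 <= nr < m and 0 <= nc < n and room[nr][nc] != 1`
def pvBFree (room : List (List Int)) (m n nr nc : Int) : Bool :=
  decide (0 ≤ nr) && decide (nr < m) && decide (0 ≤ nc) && decide (nc < n) &&
    !(pvCell room nr nc == some 1)

-- Source B's inner `step`: advance onto the free cell ahead, else turn right in place
def pvStepB (room : List (List Int)) (m n : Int) (s : Int × Int × Int) : Int × Int × Int :=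
  let p := (PySem.List.pyGet? [((0:Int),(1:Int)), (1,0), (0,-1), (-1,0)] s.2.2).getD (0,0)
  let nr := s.1 + p.1
  let nc := s.2.1 + p.2
  if pvBFree room m n nr nc then (nr, nc, s.2.2)
  else (s.1, s.2.1, PySem.Int.mod (s.2.2 + 1) 4)

def numberOfCleanRooms_alt (room : List (List Int)) : Int :=
  let m : Int := room.length
  let n : Int := ((PySem.List.pyGet? room 0).getD []).length
  let res :=
    (PySem.List.pyRange 0 (4 * m * n) 1).foldl
      (fun (acc : (Int × Int × Int) × PySem.Set (Int × Int)) _ =>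
        let st := pvStepB room m n acc.1
        (st, PySem.Set.add acc.2 (st.1, st.2.1)))
      ((0, 0, 0), PySem.Set.ofList [((0:Int), (0:Int))])
  (PySem.Set.len res.2 : Int)

-- ===== PRECONDITION & SPEC =====
-- Pre_ excludes: empty grids / an empty first row (A raises); grids whose start cell room[0][0]
-- is 1, where A walks out of the grid and either raises IndexError or wanders on via Python's
-- negative-index wraparound; and grids with a row shorter than the first row, where A raises
-- IndexError as soon as the robot's path reaches the short row (the returning cases of the last
-- two regions are path-dependent and not separable in closed form).
def Pre_numberOfCleanRooms (room : List (List Int)) : Prop :=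
  0 < room.length ∧ 0 < (room.headD []).length ∧
  (∀ row ∈ room, (room.headD []).length ≤ row.length) ∧
  (room.headD []).headD 0 ≠ 1
instance (room : List (List Int)) : Decidable (Pre_numberOfCleanRooms room) := by
  unfold Pre_numberOfCleanRooms; infer_instance

def pvWitness_numberOfCleanRooms : List (List Int) := [[0, 0], [1, 0]]

def Spec_numberOfCleanRooms (room : List (List Int)) (out : Int) : Prop := out = numberOfCleanRooms_alt room
instance (room : List (List Int)) (out : Int) : Decidable (Spec_numberOfCleanRooms room out) := by unfold Spec_numberOfCleanRooms; infer_instance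

-- ===== CLAIM (what is proved, stated in full; the proofs are below) =====
def Claim_equal_numberOfCleanRooms : Prop := ∀ (room : List (List Int)), Dom_numberOfCleanRooms room → Pre_numberOfCleanRooms room → Spec_numberOfCleanRooms room (numberOfCleanRooms room)

-- ===== LEMMAS AND PROOFS =====

-- the robot's deterministic trajectory, in B's state representation
def pvTraj (room : List (List Int)) (m n : Int) (k : Nat) : Int × Int × Int :=
  (pvStepB room m n)^[k] (0, 0, 0)

def pvPos (s : Int × Int × Int) : Int × Int := (s.1, s.2.1)

-- the set of positions occupied during the first N steps
def pvPF (room : List (List Int)) (m n : Int) (N : Nat) : Finset (Int × Int) :=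
  ((List.range (N + 1)).map (fun i => pvPos (pvTraj room m n i))).toFinset

-- reachable-state invariant: direction index in range, current cell inside the grid and free
def pvValid (room : List (List Int)) (m n : Int) (s : Int × Int × Int) : Prop :=
  0 ≤ s.2.2 ∧ s.2.2 < 4 ∧ pvBFree room m n s.1 s.2.1 = true

-- a state is a rotate moment when the cell ahead is blocked
def pvRotM (room : List (List Int)) (m n : Int) (s : Int × Int × Int) : Prop :=
  ¬ pvBFree room m n (s.1 + (pvDirAt s.2.2).1) (s.2.1 + (pvDirAt s.2.2).2) = true

-- the blocked-approach quadruple A records for the state s (ahead cell + direction vector)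
def pvEncS (s : Int × Int × Int) : Int × Int × Int × Int :=
  (s.1 + (pvDirAt s.2.2).1, s.2.1 + (pvDirAt s.2.2).2, (pvDirAt s.2.2).1, (pvDirAt s.2.2).2)

-- proof-internal intermediate loop: A's simulation in peek-ahead form with cycle detection
def pvLLoop (room : List (List Int)) (m n : Int) :
    Nat → Int → Int → Int → Int → PySem.Set (Int × Int × Int × Int) → PySem.Set (Int × Int) → Int
  | 0, _, _, _, _, _, cleaned => (PySem.Set.len cleaned : Int)
  | fuel+1, r, c, dr, dc, bumps, cleaned =>
    let nr := r + dr
    let nc := c + dc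
    if pvBFree room m n nr nc then
      pvLLoop room m n fuel nr nc dr dc bumps (PySem.Set.add cleaned (nr, nc))
    else if PySem.Set.contains bumps (nr, nc, dr, dc) then
      (PySem.Set.len cleaned : Int)
    else
      pvLLoop room m n fuel r c dc (-dr) (PySem.Set.add bumps (nr, nc, dr, dc)) cleaned

-- encode A's visited triple (row, col, d) as the bump quadruple (row, col, dr, dc)
def pvEncA (v : Int × Int × Int) : Int × Int × Int × Int :=
  (v.1, v.2.1, (pvDirAt v.2.2).1, (pvDirAt v.2.2).2)

lemma pvDirAt_inj {d e : Int} (hd0 : 0 ≤ d) (hd4 : d < 4) (he0 : 0 ≤ e) (he4 : e < 4)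
    (h : pvDirAt d = pvDirAt e) : d = e := by
  have hd : d = 0 ∨ d = 1 ∨ d = 2 ∨ d = 3 := by omega
  have he : e = 0 ∨ e = 1 ∨ e = 2 ∨ e = 3 := by omega
  rcases hd with h1 | h1 | h1 | h1 <;> rcases he with h2 | h2 | h2 | h2 <;>
    subst h1 <;> subst h2 <;> first | rfl | (exfalso; revert h; decide)

lemma pvEncA_inj {v w : Int × Int × Int} (hv : 0 ≤ v.2.2 ∧ v.2.2 < 4) (hw : 0 ≤ w.2.2 ∧ w.2.2 < 4)
    (h : pvEncA v = pvEncA w) : v = w := by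
  obtain ⟨a, b, d⟩ := v; obtain ⟨a', b', d'⟩ := w
  simp only [pvEncA, Prod.mk.injEq] at h
  obtain ⟨h1, h2, h3, h4⟩ := h
  simp only at hv hw
  have : d = d' := pvDirAt_inj hv.1 hv.2 hw.1 hw.2 (Prod.ext h3 h4)
  simp [h1, h2, this]

-- elements of A's visited all satisfy this
def pvVisInv (room : List (List Int)) (M N : Int) (v : Int × Int × Int) : Prop :=
  pvABlocked room M N v.1 v.2.1 = true ∧ 0 ≤ v.2.2 ∧ v.2.2 < 4

lemma pvMem_map_enc {visited : List (Int × Int × Int)} {x : Int × Int × Int}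
    (hinv : ∀ v ∈ visited, 0 ≤ v.2.2 ∧ v.2.2 < 4) (hx : 0 ≤ x.2.2 ∧ x.2.2 < 4) :
    pvEncA x ∈ visited.map pvEncA ↔ x ∈ visited := by
  constructor
  · intro h
    obtain ⟨v, hv, he⟩ := List.mem_map.1 h
    exact (pvEncA_inj (hinv v hv) hx he) ▸ hv
  · exact fun h => List.mem_map_of_mem h

lemma pvFree_not_blocked {room : List (List Int)} {M N r c : Int}
    (h : pvBFree room M N r c = true) : pvABlocked room M N r c = false := by
  simp only [pvBFree, Bool.and_eq_true, decide_eq_true_eq, Bool.not_eq_true'] at h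
  simp only [pvABlocked, Bool.or_eq_false_iff, beq_eq_false_iff_ne]
  refine ⟨⟨⟨⟨by omega, by omega⟩, by omega⟩, by omega⟩, ?_⟩
  simpa using h.2

lemma pvNot_blocked_free {room : List (List Int)} {M N r c : Int}
    (hb : pvABlocked room M N r c = false) (h1 : -1 ≤ r) (h2 : r ≤ M) (h3 : -1 ≤ c) (h4 : c ≤ N) :
    pvBFree room M N r c = true := by
  simp only [pvABlocked, Bool.or_eq_false_iff, beq_eq_false_iff_ne] at hb
  obtain ⟨⟨⟨⟨hc1, hc2⟩, hr1⟩, hr2⟩, hcell⟩ := hb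
  simp only [pvBFree, Bool.and_eq_true, decide_eq_true_eq, Bool.not_eq_true']
  refine ⟨⟨⟨⟨by omega, by omega⟩, by omega⟩, by omega⟩, ?_⟩
  simpa [beq_eq_false_iff_ne] using hcell

lemma pvAdd_eq {cleaned : List (Int × Int)} {x : Int × Int} :
    (if x ∈ cleaned then cleaned else cleaned ++ [x]) = PySem.Set.add cleaned x := by
  simp [PySem.Set.add, PySem.Set.contains]

lemma pvRot {d : Int} (h0 : 0 ≤ d) (h4 : d < 4) :
    pvDirAt (PySem.Int.mod (d + 1) 4) = ((pvDirAt d).2, -(pvDirAt d).1) := by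
  have hd : d = 0 ∨ d = 1 ∨ d = 2 ∨ d = 3 := by omega
  rcases hd with h | h | h | h <;> subst h <;> decide

lemma pvDir_bounds {d : Int} (h0 : 0 ≤ d) (h4 : d < 4) :
    (-1 ≤ (pvDirAt d).1 ∧ (pvDirAt d).1 ≤ 1) ∧ (-1 ≤ (pvDirAt d).2 ∧ (pvDirAt d).2 ≤ 1) := by
  have hd : d = 0 ∨ d = 1 ∨ d = 2 ∨ d = 3 := by omega
  rcases hd with h | h | h | h <;> subst h <;> decide

-- the lockstep bisimulation: A one step ahead in position, equal fuel, equal cleaned list,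
-- bumps = encoded visited
lemma pvLockstep (room : List (List Int)) (M N : Int) :
    ∀ (fuel : Nat) (r c d dr dc : Int) (visited : List (Int × Int × Int))
      (cleaned : List (Int × Int)),
      0 ≤ d → d < 4 → (dr, dc) = pvDirAt d →
      pvBFree room M N r c = true →
      (∀ v ∈ visited, pvVisInv room M N v) →
      pvALoop room M N fuel (r + dr) (c + dc) d visited cleaned
        = pvLLoop room M N fuel r c dr dc (visited.map pvEncA) cleaned := by
  intro fuel
  induction fuel with
  | zero => intro r c d dr dc visited cleaned _ _ _ _ _; simp [pvALoop, pvLLoop, PySem.Set.len]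
  | succ fuel ih =>
    intro r c d dr dc visited cleaned hd0 hd4 hvec hfree hinv
    have hdr : dr = (pvDirAt d).1 := by rw [← hvec]
    have hdc : dc = (pvDirAt d).2 := by rw [← hvec]
    have hbnd := pvDir_bounds hd0 hd4
    have hrc : (0 ≤ r ∧ r < M) ∧ (0 ≤ c ∧ c < N) := by
      have h := hfree
      simp only [pvBFree, Bool.and_eq_true, decide_eq_true_eq] at h
      exact ⟨⟨h.1.1.1.1, h.1.1.1.2⟩, h.1.1.2, h.1.2⟩
    set x : Int × Int × Int := (r + dr, c + dc, d) with hx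
    have hxd : 0 ≤ x.2.2 ∧ x.2.2 < 4 := ⟨hd0, hd4⟩
    have hxenc : pvEncA x = (r + dr, c + dc, dr, dc) := by
      simp [pvEncA, hx, hdr, hdc]
    simp only [pvALoop, pvLLoop]
    by_cases hmem : x ∈ visited
    · -- the approached state was already recorded: A exits via the loop condition,
      -- L via the bump test
      have hbl : pvABlocked room M N (r + dr) (c + dc) = true := (hinv x hmem).1
      have hnf : pvBFree room M N (r + dr) (c + dc) = false := by
        cases hf : pvBFree room M N (r + dr) (c + dc)
        · rfl
        · rw [pvFree_not_blocked hf] at hbl; exact absurd hbl (by simp)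
      have hcont : PySem.Set.contains (visited.map pvEncA) (r + dr, c + dc, dr, dc) = true := by
        have h := (pvMem_map_enc (fun v hv => (hinv v hv).2) hxd).2 hmem
        rw [hxenc] at h
        simp only [PySem.Set.contains, List.contains_eq_mem, decide_eq_true_eq]
        exact h
      have hnf' : ¬ (pvBFree room M N (r + dr) (c + dc) = true) := by rw [hnf]; simp
      rw [if_pos hmem, if_neg hnf', if_pos hcont]
      simp [PySem.Set.len]
    · rw [if_neg hmem]
      by_cases hbl : pvABlocked room M N (r + dr) (c + dc) = true
      · -- blocked ahead: A backs up, rotates and moves; L rotates in place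
        have hnf : pvBFree room M N (r + dr) (c + dc) = false := by
          cases hf : pvBFree room M N (r + dr) (c + dc)
          · rfl
          · rw [pvFree_not_blocked hf] at hbl; exact absurd hbl (by simp)
        have hncont : PySem.Set.contains (visited.map pvEncA) (r + dr, c + dc, dr, dc) = false := by
          simp only [PySem.Set.contains, List.contains_eq_mem, decide_eq_false_iff_not]
          intro h
          rw [← hxenc] at h
          exact hmem ((pvMem_map_enc (fun v hv => (hinv v hv).2) hxd).1 h)
        have hnf' : ¬ (pvBFree room M N (r + dr) (c + dc) = true) := by rw [hnf]; simp
        have hncont' : ¬ (PySem.Set.contains (visited.map pvEncA) (r + dr, c + dc, dr, dc) = true) := by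
          rw [hncont]; simp
        rw [if_pos hbl, if_neg hnf', if_neg hncont']
        have hd'0 : 0 ≤ PySem.Int.mod (d + 1) 4 := PySem.Int.mod_nonneg _ (by norm_num)
        have hd'4 : PySem.Int.mod (d + 1) 4 < 4 := PySem.Int.mod_lt _ (by norm_num)
        have hvec' : (dc, -dr) = pvDirAt (PySem.Int.mod (d + 1) 4) := by
          rw [pvRot hd0 hd4, hdr, hdc]
        have hinv' : ∀ v ∈ visited ++ [x], pvVisInv room M N v := by
          intro v hv
          rcases List.mem_append.1 hv with h | h
          · exact hinv v h
          · rw [List.mem_singleton.1 h]; exact ⟨hbl, hd0, hd4⟩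
        have hadd : PySem.Set.add (visited.map pvEncA) (r + dr, c + dc, dr, dc)
            = (visited ++ [x]).map pvEncA := by
          simp only [PySem.Set.add]
          rw [if_neg hncont']
          simp [hxenc]
        have e1 : r + dr - (pvDirAt d).1 + (pvDirAt (PySem.Int.mod (d + 1) 4)).1 = r + dc := by
          rw [pvRot hd0 hd4, hdr, hdc]; ring
        have e2 : c + dc - (pvDirAt d).2 + (pvDirAt (PySem.Int.mod (d + 1) 4)).2 = c + -dr := by
          rw [pvRot hd0 hd4, hdr, hdc]; ring
        rw [hadd] at *
        calc pvALoop room M N fuel (r + dr - (pvDirAt d).1 + (pvDirAt (PySem.Int.mod (d + 1) 4)).1)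
                (c + dc - (pvDirAt d).2 + (pvDirAt (PySem.Int.mod (d + 1) 4)).2)
                (PySem.Int.mod (d + 1) 4) (visited ++ [x]) cleaned
            = pvALoop room M N fuel (r + dc) (c + -dr) (PySem.Int.mod (d + 1) 4)
                (visited ++ [x]) cleaned := by rw [e1, e2]
          _ = pvLLoop room M N fuel r c dc (-dr) ((visited ++ [x]).map pvEncA) cleaned :=
              ih r c _ dc (-dr) (visited ++ [x]) cleaned hd'0 hd'4 hvec' hfree hinv'
      · -- free ahead: A cleans the cell it stands on and moves; L advances onto it
        have hbl' : pvABlocked room M N (r + dr) (c + dc) = false := by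
          cases h : pvABlocked room M N (r + dr) (c + dc)
          · rfl
          · exact absurd h hbl
        have hf : pvBFree room M N (r + dr) (c + dc) = true := by
          apply pvNot_blocked_free hbl' <;> omega
        rw [if_neg hbl, if_pos hf, pvAdd_eq, ← hdr, ← hdc]
        exact ih (r + dr) (c + dc) d dr dc visited (PySem.Set.add cleaned (r + dr, c + dc))
          hd0 hd4 hvec hf hinv

-- pvStepB's inline direction table is A's pvDirs; restate the step through pvDirAt
lemma pvStepB_eq (room : List (List Int)) (m n : Int) (s : Int × Int × Int) :
    pvStepB room m n s =
      if pvBFree room m n (s.1 + (pvDirAt s.2.2).1) (s.2.1 + (pvDirAt s.2.2).2)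
      then (s.1 + (pvDirAt s.2.2).1, s.2.1 + (pvDirAt s.2.2).2, s.2.2)
      else (s.1, s.2.1, PySem.Int.mod (s.2.2 + 1) 4) := rfl

lemma pvTraj_succ (room : List (List Int)) (m n : Int) (k : Nat) :
    pvTraj room m n (k + 1) = pvStepB room m n (pvTraj room m n k) :=
  Function.iterate_succ_apply' _ _ _

lemma pvTraj_add (room : List (List Int)) (m n : Int) (a b : Nat) :
    pvTraj room m n (a + b) = (pvStepB room m n)^[b] (pvTraj room m n a) := by
  simp [pvTraj, Nat.add_comm a b, Function.iterate_add_apply]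

lemma pvStep_valid {room : List (List Int)} {m n : Int} {s : Int × Int × Int}
    (h : pvValid room m n s) : pvValid room m n (pvStepB room m n s) := by
  obtain ⟨h0, h4, hf⟩ := h
  rw [pvStepB_eq]
  split_ifs with hfree
  · exact ⟨h0, h4, hfree⟩
  · exact ⟨PySem.Int.mod_nonneg _ (by norm_num), PySem.Int.mod_lt _ (by norm_num), hf⟩

lemma pvTraj_valid {room : List (List Int)} {m n : Int}
    (h0 : pvValid room m n (0, 0, 0)) (k : Nat) : pvValid room m n (pvTraj room m n k) := by
  induction k with
  | zero => exact h0
  | succ k ih => rw [pvTraj_succ]; exact pvStep_valid ih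

lemma pvMem_pvPF {room : List (List Int)} {m n : Int} {N : Nat} {p : Int × Int} :
    p ∈ pvPF room m n N ↔ ∃ i ≤ N, pvPos (pvTraj room m n i) = p := by
  simp [pvPF, List.mem_toFinset, List.mem_map, List.mem_range]

lemma pvPF_mono {room : List (List Int)} {m n : Int} {M N : Nat} (h : M ≤ N) :
    pvPF room m n M ⊆ pvPF room m n N := by
  intro p hp
  obtain ⟨i, hi, he⟩ := pvMem_pvPF.1 hp
  exact pvMem_pvPF.2 ⟨i, le_trans hi h, he⟩

-- once a state repeats, every state of the trajectory already occurred before the repeat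
lemma pvStab {room : List (List Int)} {m n : Int} {i j : Nat}
    (hij : i < j) (h : pvTraj room m n i = pvTraj room m n j) :
    ∀ k, ∃ l < j, pvTraj room m n k = pvTraj room m n l := by
  intro k
  induction k using Nat.strong_induction_on with
  | _ k ih =>
    by_cases hk : k < j
    · exact ⟨k, hk, rfl⟩
    · replace hk : j ≤ k := by omega
      have e1 : pvTraj room m n k = (pvStepB room m n)^[k - j] (pvTraj room m n j) := by
        rw [← pvTraj_add]; congr 1; omega
      have e2 : pvTraj room m n k = pvTraj room m n (i + (k - j)) := by
        rw [pvTraj_add, h]; exact e1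
      obtain ⟨l, hl, he⟩ := ih (i + (k - j)) (by omega)
      exact ⟨l, hl, e2.trans he⟩

lemma pvPF_eq {room : List (List Int)} {m n : Int} {i j : Nat}
    (hij : i < j) (h : pvTraj room m n i = pvTraj room m n j) {M N : Nat}
    (hM : j ≤ M + 1) (hN : j ≤ N + 1) : pvPF room m n M = pvPF room m n N := by
  have key : ∀ K : Nat, j ≤ K + 1 → pvPF room m n K = pvPF room m n (j - 1) := by
    intro K hK
    apply Finset.Subset.antisymm
    · intro p hp
      obtain ⟨a, _, he⟩ := pvMem_pvPF.1 hp
      obtain ⟨l, hl, hel⟩ := pvStab hij h a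
      exact pvMem_pvPF.2 ⟨l, by omega, by rw [← hel, he]⟩
    · exact pvPF_mono (by omega)
  rw [key M hM, key N hN]

-- pigeonhole on the ≤ 4*m*n reachable states: the trajectory repeats within 4*m*n steps
lemma pvRepeat {room : List (List Int)} {m n : Int}
    (h0 : pvValid room m n (0, 0, 0)) :
    ∃ i j : Nat, i < j ∧ j ≤ 4 * m.toNat * n.toNat ∧ pvTraj room m n i = pvTraj room m n j := by
  classical
  set F : Nat := 4 * m.toNat * n.toNat with hF
  set S : Finset (Int × Int × Int) :=
    (Finset.Ico (0:Int) m) ×ˢ (Finset.Ico (0:Int) n) ×ˢ (Finset.Ico (0:Int) 4) with hS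
  have hcard : S.card = F := by
    rw [hS, Finset.card_product, Finset.card_product, Int.card_Ico, Int.card_Ico, Int.card_Ico]
    simp [hF]; ring
  have hmaps : ∀ k ∈ Finset.range (F + 1), pvTraj room m n k ∈ S := by
    intro k _
    have hv := pvTraj_valid h0 k
    obtain ⟨hd0, hd4, hf⟩ := hv
    simp only [pvBFree, Bool.and_eq_true, decide_eq_true_eq] at hf
    simp only [hS, Finset.mem_product, Finset.mem_Ico]
    exact ⟨⟨hf.1.1.1.1, hf.1.1.1.2⟩, ⟨hf.1.1.2, hf.1.2⟩, hd0, hd4⟩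
  have hlt : S.card < (Finset.range (F + 1)).card := by
    rw [hcard, Finset.card_range]; omega
  obtain ⟨a, ha, b, hb, hne, heq⟩ :=
    Finset.exists_ne_map_eq_of_card_lt_of_maps_to hlt hmaps
  simp only [Finset.mem_range] at ha hb
  rcases lt_or_gt_of_ne hne with hlt' | hlt'
  · exact ⟨a, b, hlt', by omega, heq⟩
  · exact ⟨b, a, hlt', by omega, heq.symm⟩

-- the combined (state, cleaned) update of B's loop body
def pvBStep (room : List (List Int)) (m n : Int)
    (acc : (Int × Int × Int) × PySem.Set (Int × Int)) :
    (Int × Int × Int) × PySem.Set (Int × Int) :=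
  let st := pvStepB room m n acc.1
  (st, PySem.Set.add acc.2 (st.1, st.2.1))

lemma pvFoldl_iterate {α β : Type} (f : α → α) (l : List β) :
    ∀ init : α, l.foldl (fun a _ => f a) init = f^[l.length] init := by
  induction l with
  | nil => intro init; rfl
  | cons x xs ih => intro init; simp [List.foldl, ih, Function.iterate_succ_apply]

lemma pvBIter (room : List (List Int)) (m n : Int) : ∀ k : Nat,
    ((pvBStep room m n)^[k] ((0, 0, 0), [((0:Int), (0:Int))])).1 = pvTraj room m n k ∧
    ((pvBStep room m n)^[k] ((0, 0, 0), [((0:Int), (0:Int))])).2.Nodup ∧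
    (∀ p, p ∈ ((pvBStep room m n)^[k] ((0, 0, 0), [((0:Int), (0:Int))])).2 ↔
      ∃ i ≤ k, pvPos (pvTraj room m n i) = p) := by
  intro k
  induction k with
  | zero =>
    refine ⟨rfl, by simp, ?_⟩
    intro p
    simp only [Function.iterate_zero, id_eq, List.mem_singleton]
    constructor
    · rintro rfl; exact ⟨0, le_refl 0, rfl⟩
    · rintro ⟨i, hi, he⟩; interval_cases i; exact he.symm
  | succ k ih =>
    obtain ⟨h1, h2, h3⟩ := ih
    rw [Function.iterate_succ_apply']
    refine ⟨by simp [pvBStep, h1, pvTraj_succ], PySem.Set.nodup_add _ _ h2, ?_⟩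
    intro p
    simp only [pvBStep]
    rw [PySem.Set.mem_add]
    constructor
    · rintro (hp | rfl)
      · obtain ⟨i, hi, he⟩ := h3 p |>.1 hp
        exact ⟨i, by omega, he⟩
      · exact ⟨k + 1, le_refl _, by simp [pvPos, h1, pvTraj_succ]⟩
    · rintro ⟨i, hi, he⟩
      by_cases hik : i ≤ k
      · exact Or.inl ((h3 p).2 ⟨i, hik, he⟩)
      · have : i = k + 1 := by omega
        subst this
        right
        rw [← he]
        simp [pvPos, h1, pvTraj_succ]

-- B's port computes the number of positions occupied during the first 4*m*n steps
lemma pvAlt_eq (room : List (List Int)) :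
    numberOfCleanRooms_alt room =
      ((pvPF room (room.length : Int) (((PySem.List.pyGet? room 0).getD []).length : Int)
        (4 * (room.length : Int) * (((PySem.List.pyGet? room 0).getD []).length : Int)).toNat).card : Int) := by
  set m : Int := (room.length : Int) with hmdef
  set n : Int := (((PySem.List.pyGet? room 0).getD []).length : Int) with hndef
  set F : Nat := (4 * m * n).toNat with hFdef
  have hof : PySem.Set.ofList [((0:Int), (0:Int))] = [((0:Int), (0:Int))] := by decide
  have hlen : (PySem.List.pyRange 0 (4 * m * n) 1).length = F := by
    rw [PySem.List.length_pyRange_one]; simp [hFdef]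
  have hfold :
      (PySem.List.pyRange 0 (4 * m * n) 1).foldl
        (fun (acc : (Int × Int × Int) × PySem.Set (Int × Int)) _ =>
          let st := pvStepB room m n acc.1
          (st, PySem.Set.add acc.2 (st.1, st.2.1)))
        ((0, 0, 0), [((0:Int), (0:Int))])
      = (pvBStep room m n)^[F] ((0, 0, 0), [((0:Int), (0:Int))]) := by
    rw [← hlen]
    exact pvFoldl_iterate (pvBStep room m n) _ _
  obtain ⟨-, h2, h3⟩ := pvBIter room m n F
  show (PySem.Set.len ((PySem.List.pyRange 0 (4 * m * n) 1).foldl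
        (fun (acc : (Int × Int × Int) × PySem.Set (Int × Int)) _ =>
          let st := pvStepB room m n acc.1
          (st, PySem.Set.add acc.2 (st.1, st.2.1)))
        ((0, 0, 0), PySem.Set.ofList [((0:Int), (0:Int))])).2 : Int) = _
  rw [hof, hfold]
  have hset : ((pvBStep room m n)^[F] ((0, 0, 0), [((0:Int), (0:Int))])).2.toFinset
      = pvPF room m n F := by
    apply Finset.ext
    intro p
    rw [List.mem_toFinset, pvMem_pvPF]
    exact h3 p
  rw [PySem.Set.len, ← List.toFinset_card_of_nodup h2, hset]

lemma pvEncS_inj {v w : Int × Int × Int} (hv : 0 ≤ v.2.2 ∧ v.2.2 < 4)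
    (hw : 0 ≤ w.2.2 ∧ w.2.2 < 4) (h : pvEncS v = pvEncS w) : v = w := by
  simp only [pvEncS, Prod.mk.injEq] at h
  obtain ⟨h1, h2, h3, h4⟩ := h
  have hd : v.2.2 = w.2.2 := pvDirAt_inj hv.1 hv.2 hw.1 hw.2 (Prod.ext h3 h4)
  rw [hd] at h1 h2
  have hr : v.1 = w.1 := by omega
  have hc : v.2.1 = w.2.1 := by omega
  exact Prod.ext hr (Prod.ext hc hd)

-- the intermediate loop launched at trajectory time t computes the number of positions
-- the trajectory occupies during its first t+fuel steps
lemma pvLChar (room : List (List Int)) (m n : Int) (h0 : pvValid room m n (0, 0, 0)) :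
    ∀ (fuel t : Nat) (bumps : PySem.Set (Int × Int × Int × Int))
      (cleaned : PySem.Set (Int × Int)),
      (∀ q, q ∈ bumps ↔
        ∃ i < t, pvRotM room m n (pvTraj room m n i) ∧ pvEncS (pvTraj room m n i) = q) →
      cleaned.Nodup →
      (∀ p, p ∈ cleaned ↔ ∃ i ≤ t, pvPos (pvTraj room m n i) = p) →
      pvLLoop room m n fuel (pvTraj room m n t).1 (pvTraj room m n t).2.1
          (pvDirAt (pvTraj room m n t).2.2).1 (pvDirAt (pvTraj room m n t).2.2).2 bumps cleaned
        = ((pvPF room m n (t + fuel)).card : Int) := by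
  intro fuel
  induction fuel with
  | zero =>
    intro t bumps cleaned hb hnd hc
    have hset : cleaned.toFinset = pvPF room m n t :=
      Finset.ext (fun p => by rw [List.mem_toFinset, pvMem_pvPF]; exact hc p)
    simp only [pvLLoop, PySem.Set.len, Nat.add_zero]
    rw [← List.toFinset_card_of_nodup hnd, hset]
  | succ fuel ih =>
    intro t bumps cleaned hb hnd hc
    obtain ⟨hd0, hd4, hfcur⟩ := pvTraj_valid h0 t
    simp only [pvLLoop]
    by_cases hfree : pvBFree room m n ((pvTraj room m n t).1 + (pvDirAt (pvTraj room m n t).2.2).1)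
        ((pvTraj room m n t).2.1 + (pvDirAt (pvTraj room m n t).2.2).2) = true
    · rw [if_pos hfree]
      have hsucc : pvTraj room m n (t + 1) =
          ((pvTraj room m n t).1 + (pvDirAt (pvTraj room m n t).2.2).1,
           (pvTraj room m n t).2.1 + (pvDirAt (pvTraj room m n t).2.2).2,
           (pvTraj room m n t).2.2) := by
        rw [pvTraj_succ, pvStepB_eq, if_pos hfree]
      have hb' : ∀ q, q ∈ bumps ↔
          ∃ i < t + 1, pvRotM room m n (pvTraj room m n i) ∧ pvEncS (pvTraj room m n i) = q := by
        intro q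
        rw [hb q]
        constructor
        · rintro ⟨i, hi, hrot, he⟩; exact ⟨i, by omega, hrot, he⟩
        · rintro ⟨i, hi, hrot, he⟩
          rcases Nat.lt_succ_iff_lt_or_eq.1 hi with hi' | rfl
          · exact ⟨i, hi', hrot, he⟩
          · exact absurd hfree hrot
      have hc' : ∀ p, p ∈ PySem.Set.add cleaned
            ((pvTraj room m n t).1 + (pvDirAt (pvTraj room m n t).2.2).1,
             (pvTraj room m n t).2.1 + (pvDirAt (pvTraj room m n t).2.2).2) ↔
          ∃ i ≤ t + 1, pvPos (pvTraj room m n i) = p := by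
        intro p
        rw [PySem.Set.mem_add]
        constructor
        · rintro (hp | rfl)
          · obtain ⟨i, hi, he⟩ := (hc p).1 hp; exact ⟨i, by omega, he⟩
          · exact ⟨t + 1, le_refl _, by rw [hsucc]; rfl⟩
        · rintro ⟨i, hi, he⟩
          by_cases hik : i ≤ t
          · exact Or.inl ((hc p).2 ⟨i, hik, he⟩)
          · have : i = t + 1 := by omega
            subst this
            right; rw [← he, hsucc]; rfl
      have := ih (t + 1) bumps (PySem.Set.add cleaned
          ((pvTraj room m n t).1 + (pvDirAt (pvTraj room m n t).2.2).1,
           (pvTraj room m n t).2.1 + (pvDirAt (pvTraj room m n t).2.2).2))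
          hb' (PySem.Set.nodup_add _ _ hnd) hc'
      rw [hsucc] at this
      have hidx : t + (fuel + 1) = (t + 1) + fuel := by omega
      rw [hidx]
      exact this
    · rw [if_neg hfree]
      have hrot : pvRotM room m n (pvTraj room m n t) := hfree
      have hencc : pvEncS (pvTraj room m n t) =
          ((pvTraj room m n t).1 + (pvDirAt (pvTraj room m n t).2.2).1,
           (pvTraj room m n t).2.1 + (pvDirAt (pvTraj room m n t).2.2).2,
           (pvDirAt (pvTraj room m n t).2.2).1, (pvDirAt (pvTraj room m n t).2.2).2) := rfl
      by_cases hcont : PySem.Set.contains bumps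
          ((pvTraj room m n t).1 + (pvDirAt (pvTraj room m n t).2.2).1,
           (pvTraj room m n t).2.1 + (pvDirAt (pvTraj room m n t).2.2).2,
           (pvDirAt (pvTraj room m n t).2.2).1, (pvDirAt (pvTraj room m n t).2.2).2) = true
      · rw [if_pos hcont]
        have hmem : ((pvTraj room m n t).1 + (pvDirAt (pvTraj room m n t).2.2).1,
           (pvTraj room m n t).2.1 + (pvDirAt (pvTraj room m n t).2.2).2,
           (pvDirAt (pvTraj room m n t).2.2).1, (pvDirAt (pvTraj room m n t).2.2).2) ∈ bumps := by
          simpa [PySem.Set.contains, List.contains_eq_mem] using hcont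
        obtain ⟨i, hi, hroti, hei⟩ := (hb _).1 hmem
        have hieq : pvTraj room m n i = pvTraj room m n t := by
          apply pvEncS_inj ⟨(pvTraj_valid h0 i).1, (pvTraj_valid h0 i).2.1⟩ ⟨hd0, hd4⟩
          rw [hei, hencc]
        have hPF : pvPF room m n (t + (fuel + 1)) = pvPF room m n t :=
          pvPF_eq hi hieq (by omega) (by omega)
        have hset : cleaned.toFinset = pvPF room m n t :=
          Finset.ext (fun p => by rw [List.mem_toFinset, pvMem_pvPF]; exact hc p)
        rw [hPF, PySem.Set.len, ← List.toFinset_card_of_nodup hnd, hset]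
      · rw [if_neg hcont]
        have hsucc : pvTraj room m n (t + 1) =
            ((pvTraj room m n t).1, (pvTraj room m n t).2.1,
             PySem.Int.mod ((pvTraj room m n t).2.2 + 1) 4) := by
          rw [pvTraj_succ, pvStepB_eq, if_neg hfree]
        have hb' : ∀ q, q ∈ PySem.Set.add bumps
            ((pvTraj room m n t).1 + (pvDirAt (pvTraj room m n t).2.2).1,
             (pvTraj room m n t).2.1 + (pvDirAt (pvTraj room m n t).2.2).2,
             (pvDirAt (pvTraj room m n t).2.2).1, (pvDirAt (pvTraj room m n t).2.2).2) ↔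
            ∃ i < t + 1, pvRotM room m n (pvTraj room m n i) ∧ pvEncS (pvTraj room m n i) = q := by
          intro q
          rw [PySem.Set.mem_add]
          constructor
          · rintro (hq | rfl)
            · obtain ⟨i, hi, hroti, hei⟩ := (hb q).1 hq
              exact ⟨i, by omega, hroti, hei⟩
            · exact ⟨t, by omega, hrot, hencc⟩
          · rintro ⟨i, hi, hroti, hei⟩
            by_cases hik : i < t
            · exact Or.inl ((hb q).2 ⟨i, hik, hroti, hei⟩)
            · have : i = t := by omega
              subst this
              right; rw [← hei, hencc]
        have hc' : ∀ p, p ∈ cleaned ↔ ∃ i ≤ t + 1, pvPos (pvTraj room m n i) = p := by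
          intro p
          rw [hc p]
          constructor
          · rintro ⟨i, hi, he⟩; exact ⟨i, by omega, he⟩
          · rintro ⟨i, hi, he⟩
            by_cases hik : i ≤ t
            · exact ⟨i, hik, he⟩
            · have : i = t + 1 := by omega
              subst this
              refine ⟨t, le_refl _, ?_⟩
              rw [← he, hsucc]; rfl
        have := ih (t + 1) (PySem.Set.add bumps
            ((pvTraj room m n t).1 + (pvDirAt (pvTraj room m n t).2.2).1,
             (pvTraj room m n t).2.1 + (pvDirAt (pvTraj room m n t).2.2).2,
             (pvDirAt (pvTraj room m n t).2.2).1, (pvDirAt (pvTraj room m n t).2.2).2))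
            cleaned hb' hnd hc'
        rw [hsucc] at this
        simp only at this
        rw [pvRot hd0 hd4] at this
        have hidx : t + (fuel + 1) = (t + 1) + fuel := by omega
        rw [hidx]
        exact this

theorem pv_main (room : List (List Int)) (h : Pre_numberOfCleanRooms room) :
    numberOfCleanRooms room = numberOfCleanRooms_alt room := by
  obtain ⟨h1, h2, h3, h4⟩ := h
  rcases room with _ | ⟨row0, rest⟩
  · simp at h1
  rcases row0 with _ | ⟨a, arest⟩
  · simp at h2
  simp only [List.headD_cons] at h4
  have hcell : pvCell ((a :: arest) :: rest) 0 0 = some a := by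
    simp [pvCell]
  have hlen0 : PySem.List.pyGet? ((a :: arest) :: rest) 0 = some (a :: arest) :=
    PySem.List.pyGet?_zero_cons _ _
  set room := (a :: arest) :: rest with hroom
  set M : Int := (room.length : Int) with hM
  set N : Int := ((a :: arest).length : Int) with hN
  have hM1 : 1 ≤ M := by rw [hM, hroom]; simp
  have hN1 : 1 ≤ N := by rw [hN]; simp
  have hfree0 : pvBFree room M N 0 0 = true := by
    simp only [pvBFree, hcell, Bool.and_eq_true, decide_eq_true_eq, Bool.not_eq_true']
    refine ⟨⟨⟨⟨le_refl 0, by omega⟩, le_refl 0⟩, by omega⟩, ?_⟩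
    simp [h4]
  have hbl0 : pvABlocked room M N 0 0 = false := by
    simp only [pvABlocked, hcell, Bool.or_eq_false_iff, beq_eq_false_iff_ne]
    refine ⟨⟨⟨⟨by omega, by omega⟩, by omega⟩, by omega⟩, ?_⟩
    simp [h4]
  have h0 : pvValid room M N (0, 0, 0) := ⟨le_refl 0, by norm_num, hfree0⟩
  -- A's port, first iteration peeled, in lockstep with the intermediate loop
  have hA : numberOfCleanRooms room = pvLLoop room M N (pvBase room + 1) 0 0 0 1 [] [(0, 0)] := by
    have hunf : numberOfCleanRooms room = pvALoop room M N ((pvBase room + 1) + 1) 0 0 0 [] [] := by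
      simp only [numberOfCleanRooms, hlen0, Option.getD_some, ← hM, ← hN]
    rw [hunf]
    simp only [pvALoop]
    rw [if_neg (by simp), if_neg (by rw [hbl0]; simp)]
    have hstep := pvLockstep room M N (pvBase room + 1) 0 0 0 0 1 [] [(0, 0)]
      (by norm_num) (by norm_num) (by decide) hfree0 (by simp)
    simp only [List.map_nil] at hstep
    have hd0 : pvDirAt 0 = ((0 : Int), (1 : Int)) := by decide
    simp only [hd0, List.not_mem_nil, if_false, List.nil_append]
    convert hstep using 2
  -- the intermediate loop counts the positions of the first pvBase+1 trajectory steps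
  have htraj0 : pvTraj room M N 0 = (0, 0, 0) := rfl
  have hL : pvLLoop room M N (pvBase room + 1) 0 0 0 1 [] [(0, 0)]
      = ((pvPF room M N (0 + (pvBase room + 1))).card : Int) := by
    have hchar := pvLChar room M N h0 (pvBase room + 1) 0 [] [((0:Int), (0:Int))]
      (by intro q; simp)
      (by simp)
      (by
        intro p
        simp only [List.mem_singleton]
        constructor
        · rintro rfl; exact ⟨0, le_refl 0, rfl⟩
        · rintro ⟨i, hi, he⟩; interval_cases i; exact he.symm)
    rw [htraj0] at hchar
    have hd0 : pvDirAt 0 = ((0 : Int), (1 : Int)) := by decide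
    rw [hd0] at hchar
    exact hchar
  -- B's port counts the positions of the first 4*M*N trajectory steps
  have hB : numberOfCleanRooms_alt room = ((pvPF room M N (4 * M * N).toNat).card : Int) := by
    have := pvAlt_eq room
    rw [hlen0] at this
    simpa [← hM, ← hN] using this
  -- both horizons lie beyond the first state repetition, so the two sets agree
  obtain ⟨i, j, hij, hjle, heq⟩ := pvRepeat (room := room) (m := M) (n := N) h0
  have hMt : M.toNat = room.length := by rw [hM]; simp
  have hNt : N.toNat = (a :: arest).length := by rw [hN]; simp
  have hFn : (4 * M * N).toNat = 4 * M.toNat * N.toNat := by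
    rw [hM, hN]
    have hcast : (4:Int) * (room.length : Int) * ((a :: arest).length : Int)
        = ((4 * room.length * (a :: arest).length : Nat) : Int) := by push_cast; ring
    rw [hcast, Int.toNat_natCast]
    simp
  have hbase : 4 * M.toNat * N.toNat ≤ pvBase room + 1 := by
    rw [hMt, hNt, pvBase]
    have hhead : (room.headD []).length = (a :: arest).length := by simp [hroom]
    rw [hhead]
    have e1 : 4 * room.length * (a :: arest).length
        ≤ 4 * (room.length + 2) * ((a :: arest).length + 2) :=
      Nat.mul_le_mul (Nat.mul_le_mul (le_refl 4) (Nat.le_add_right _ 2)) (Nat.le_add_right _ 2)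
    have e2 : 4 * (room.length + 2) * ((a :: arest).length + 2)
        ≤ 4 * (room.length + 2) * ((a :: arest).length + 2)
            * (room.length + (a :: arest).length + 2) :=
      Nat.le_mul_of_pos_right _ (by omega)
    omega
  have hPF : pvPF room M N (0 + (pvBase room + 1)) = pvPF room M N (4 * M * N).toNat := by
    apply pvPF_eq hij heq
    · omega
    · rw [hFn]; omega
  rw [hA, hL, hB, hPF]

-- ===== VERDICT (by name: the statement is the Claim_ definition above) =====
theorem numberOfCleanRooms_spec : Claim_equal_numberOfCleanRooms := by
  intro room _ hpre
  exact pv_main room hpre
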